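-- pv_equiv track=rewrite | github.com/allagonne/Euler_project | euler101.py | gen_sequence
-- ===== SOURCE A (Python) =====
-- def gen_sequence(polynom,k):
--     '''generates the sequence of k first terms of the polynom'''
--     sequence = []
--     for i in range(1,k+1):
--         term = 0
--         for j in range(len(polynom)):
--             term += polynom[j]*(i**j)
--         sequence.append(term)
--     return sequence
-- ===== SOURCE B (Python) =====
-- def gen_sequence(polynom, k):
--     '''generates the sequence of k first terms of the polynom'''
--     pts = list(range(1, k + 1))
--     seq = [0] * len(pts)
--     pw = [1] * len(pts)
--     for c in polynom:
--         seq = [s + c * p for s, p in zip(seq, pw)]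
--         pw = [p * i for p, i in zip(pw, pts)]
--     return seq
-- ===== Notes on version B (the rewrite author's own statement) =====
-- stated objective: faster
-- what changed: Swaps the loop nesting: instead of A's per-point sum with i**j recomputed for every exponent, B iterates once over the coefficients and vector-updates a running-sum list and an incremental power list over all evaluation points, removing repeated exponentiation.
import Mathlib
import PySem

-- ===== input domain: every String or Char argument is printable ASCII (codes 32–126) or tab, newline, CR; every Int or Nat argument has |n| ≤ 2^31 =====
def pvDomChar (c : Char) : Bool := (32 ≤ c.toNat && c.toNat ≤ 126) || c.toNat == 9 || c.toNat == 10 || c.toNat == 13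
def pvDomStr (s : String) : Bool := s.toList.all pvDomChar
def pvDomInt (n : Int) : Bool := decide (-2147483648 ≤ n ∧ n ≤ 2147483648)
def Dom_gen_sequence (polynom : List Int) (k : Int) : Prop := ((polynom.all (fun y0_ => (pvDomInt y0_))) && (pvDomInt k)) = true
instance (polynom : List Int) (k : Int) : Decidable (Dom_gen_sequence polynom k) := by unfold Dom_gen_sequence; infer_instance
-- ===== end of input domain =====

-- B swaps A's loop nesting: A evaluates each point by an index loop with i**j;
-- B loops once over the coefficients, vector-updating a running-sum list and an
-- incremental power list over all evaluation points.

-- ===== PORT A =====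
-- for i in range(1, k+1): term = 0; for j in range(len(polynom)): term += polynom[j]*(i**j); sequence.append(term)
def gen_sequence (polynom : List Int) (k : Int) : List Int :=
  (PySem.List.pyRange 1 (k + 1) 1).foldl
    (fun sequence i =>
      sequence ++ [(PySem.List.pyRange 0 (polynom.length : Int) 1).foldl
        (fun term j => term + PySem.List.pyGetD polynom j 0 * i ^ j.toNat) 0])
    []

-- ===== PORT B =====
-- pts = range(1,k+1); seq = [0]*len(pts); pw = [1]*len(pts);
-- for c in polynom: seq = [s + c*p for s,p in zip(seq,pw)]; pw = [p*i for p,i in zip(pw,pts)]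
def gen_sequence_alt (polynom : List Int) (k : Int) : List Int :=
  let pts := PySem.List.pyRange 1 (k + 1) 1
  (polynom.foldl
      (fun (st : List Int × List Int) c =>
        (List.zipWith (fun s p => s + c * p) st.1 st.2,
         List.zipWith (fun p i => p * i) st.2 pts))
      (pts.map (fun _ => 0), pts.map (fun _ => 1))).1

-- ===== PRECONDITION & SPEC =====
def Spec_gen_sequence (polynom : List Int) (k : Int) (out : List Int) : Prop := out = gen_sequence_alt polynom k
instance (polynom : List Int) (k : Int) (out : List Int) : Decidable (Spec_gen_sequence polynom k out) := by unfold Spec_gen_sequence; infer_instance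

-- ===== CLAIM (what is proved, stated in full; the proofs are below) =====
def Claim_equal_gen_sequence : Prop := ∀ (polynom : List Int) (k : Int), Dom_gen_sequence polynom k → Spec_gen_sequence polynom k (gen_sequence polynom k)

-- ===== LEMMAS AND PROOFS =====

-- 'for x in l: acc += f(x)' is the initial value plus the sum of the mapped list.
theorem foldl_add_eq_sum (l : List ℕ) (f : ℕ → Int) (t : Int) :
    l.foldl (fun x y => x + f y) t = t + (l.map f).sum := by
  induction l generalizing t with
  | nil => simp
  | cons a l ih => simp [ih]; ring

-- the power-weighted coefficient sum A computes per point
def polyEval (p : List Int) (i : Int) : Int :=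
  ((List.range p.length).map (fun j => p.getD j 0 * i ^ j)).sum

-- A's inner index loop computes polyEval.
theorem innerA_eq (i : Int) (p : List Int) :
    (PySem.List.pyRange 0 (p.length : Int) 1).foldl
        (fun term j => term + PySem.List.pyGetD p j 0 * i ^ j.toNat) 0
      = polyEval p i := by
  rw [PySem.List.pyRange_one]
  simp only [sub_zero, Int.toNat_natCast, List.foldl_map]
  rw [foldl_add_eq_sum]
  simp only [zero_add, polyEval]
  refine congrArg List.sum (List.map_congr_left ?_)
  intro j hj
  simp

theorem polyEval_cons (c : Int) (p : List Int) (i : Int) :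
    polyEval (c :: p) i = c + i * polyEval p i := by
  unfold polyEval
  rw [List.length_cons, List.range_succ_eq_map, List.map_cons, List.map_map, List.sum_cons]
  have hf : ((fun j => (c :: p).getD j 0 * i ^ j) ∘ Nat.succ)
      = fun j => (p.getD j 0 * i ^ j) * i := by
    funext j
    simp [Function.comp, pow_succ]
    ring
  rw [hf, List.sum_map_mul_right]
  simp
  ring

-- zipWith of two maps over the same list is a map
theorem zipWith_map_same {α β γ δ : Type} (f : β → γ → δ) (g : α → β) (h : α → γ) (l : List α) :
    List.zipWith f (l.map g) (l.map h) = l.map (fun x => f (g x) (h x)) := by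
  induction l with
  | nil => rfl
  | cons a l ih => simp [ih]

-- the power list's update: multiplying a mapped list pointwise by the base list
theorem zipWith_mul_map (g : Int → Int) (l : List Int) :
    List.zipWith (fun p i => p * i) (l.map g) l = l.map (fun i => g i * i) := by
  induction l with
  | nil => rfl
  | cons a l ih => simp [ih]

-- invariant of B's coefficient loop: state stays a pair of maps with closed forms
theorem altFold_eq (p : List Int) (pts : List Int) (s g : Int → Int) :
    (p.foldl
        (fun (st : List Int × List Int) c =>
          (List.zipWith (fun s p => s + c * p) st.1 st.2,
           List.zipWith (fun p i => p * i) st.2 pts))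
        (pts.map s, pts.map g)).1
      = pts.map (fun i => s i + g i * polyEval p i) := by
  induction p generalizing s g with
  | nil => simp [polyEval]
  | cons c p ih =>
    rw [List.foldl_cons, zipWith_map_same, zipWith_mul_map, ih]
    refine List.map_congr_left ?_
    intro i _
    rw [polyEval_cons]
    ring

-- ===== VERDICT (by name: the statement is the Claim_ definition above) =====
theorem gen_sequence_spec : Claim_equal_gen_sequence := by
  intro polynom k _
  unfold Spec_gen_sequence gen_sequence gen_sequence_alt
  rw [PySem.List.foldl_append_singleton_eq_map]
  simp only [List.nil_append]
  rw [altFold_eq]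
  refine List.map_congr_left ?_
  intro i _
  rw [innerA_eq]
  ring
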